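-- pv_equiv track=rewrite | github.com/immortalR012/note_manager | search_notes_function.py..py | search_notes
-- ===== SOURCE A (Python) =====
-- def search_notes(notes, keyword=None, status=None):
--     if not notes:
--         return []
--
--     if keyword:
--         notes = [
--             note for note in notes
--             if keyword.lower() in note.get('title', '').lower()
--                or keyword.lower() in note.get('content', '').lower()
--                or keyword.lower() in note.get('username', '').lower()
--         ]
--
--     if status:
--         notes = [note for note in notes if note.get('status') == status]
--
--     return notes
-- ===== SOURCE B (Python) =====
-- def search_notes(notes, keyword=None, status=None):
--     # Index-set approach: build the set of indices passing each active filter,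
--     # intersect, then gather the surviving notes in index order.
--     if not notes:
--         return []
--     ok = set(range(len(notes)))
--     if keyword:
--         kw = keyword.lower()
--         ok &= {i for i, note in enumerate(notes)
--                if kw in note.get('title', '').lower()
--                or kw in note.get('content', '').lower()
--                or kw in note.get('username', '').lower()}
--     if status:
--         ok &= {i for i, note in enumerate(notes) if note.get('status') == status}
--     return [notes[i] for i in sorted(ok)]
-- ===== Notes on version B (the rewrite author's own statement) =====
-- stated objective: alternative
-- what changed: Replaces A's sequential list-filter passes with an index-set algorithm: B builds the set of note indices passing each active filter, intersects the sets, and gathers the surviving notes by sorted index.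
import Mathlib
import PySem

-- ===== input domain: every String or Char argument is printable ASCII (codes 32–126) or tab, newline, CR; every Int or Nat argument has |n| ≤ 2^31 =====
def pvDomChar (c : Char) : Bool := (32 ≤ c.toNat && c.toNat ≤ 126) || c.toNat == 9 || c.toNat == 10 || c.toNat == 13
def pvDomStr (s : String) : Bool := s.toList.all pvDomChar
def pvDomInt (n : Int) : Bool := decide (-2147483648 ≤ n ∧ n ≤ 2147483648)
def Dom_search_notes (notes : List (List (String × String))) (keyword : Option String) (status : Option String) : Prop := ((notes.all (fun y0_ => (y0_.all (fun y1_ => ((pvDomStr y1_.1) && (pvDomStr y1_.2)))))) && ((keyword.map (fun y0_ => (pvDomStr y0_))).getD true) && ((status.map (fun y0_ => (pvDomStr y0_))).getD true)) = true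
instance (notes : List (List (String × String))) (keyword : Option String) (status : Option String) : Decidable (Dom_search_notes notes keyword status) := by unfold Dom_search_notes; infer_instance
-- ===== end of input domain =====

-- B replaces A's sequential list-filter passes by index SETS: the set of note indices
-- passing each active filter is built, the sets are intersected, and the survivors are
-- gathered by sorted index; return VALUES agree everywhere (A may return the same list
-- object when no filter applies, B always builds a fresh list — value equality only).

-- note.get(k, '') on a note (dict → association list); shared primitive wrapper
def noteGetD (note : List (String × String)) (k : String) : String :=
  PySem.Dict.getD (PySem.Dict.mk note) k ""

-- note.get(k)  (no default)
def noteGet? (note : List (String × String)) (k : String) : Option String :=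
  PySem.Dict.get? (PySem.Dict.mk note) k

-- ===== PORT A =====
-- A's keyword comprehension predicate (keyword.lower() recomputed at each use, as in A)
def aKwHit (keyword : String) (note : List (String × String)) : Bool :=
  PySem.Str.isIn (PySem.Str.lower keyword) (PySem.Str.lower (noteGetD note "title")) ||
  PySem.Str.isIn (PySem.Str.lower keyword) (PySem.Str.lower (noteGetD note "content")) ||
  PySem.Str.isIn (PySem.Str.lower keyword) (PySem.Str.lower (noteGetD note "username"))

def search_notes (notes : List (List (String × String))) (keyword : Option String) (status : Option String) : List (List (String × String)) :=
  if notes = [] then []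
  else
    let notes1 :=
      match keyword with
      | some kw => if kw = "" then notes else notes.filter (fun note => aKwHit kw note)
      | none => notes
    let notes2 :=
      match status with
      | some st => if st = "" then notes1 else notes1.filter (fun note => noteGet? note "status" == some st)
      | none => notes1
    notes2

-- ===== PORT B =====
-- B's keyword predicate on one note, keyword already lowered
def bKwHit (lkw : String) (note : List (String × String)) : Bool :=
  PySem.Str.isIn lkw (PySem.Str.lower (noteGetD note "title")) ||
  PySem.Str.isIn lkw (PySem.Str.lower (noteGetD note "content")) ||
  PySem.Str.isIn lkw (PySem.Str.lower (noteGetD note "username"))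

-- {i for i, note in enumerate(notes) if p(note)}  (a set comprehension over enumerate)
def idxSet (notes : List (List (String × String))) (p : List (String × String) → Bool) : PySem.Set Int :=
  PySem.Set.ofList (((PySem.List.enumerate notes).filter (fun q => p q.2)).map (·.1))

def search_notes_alt (notes : List (List (String × String))) (keyword : Option String) (status : Option String) : List (List (String × String)) :=
  if notes = [] then []
  else
    -- ok = set(range(len(notes)))
    let ok0 : PySem.Set Int := PySem.Set.ofList (PySem.List.pyRange 0 (PySem.List.len notes))
    let ok1 : PySem.Set Int :=
      match keyword with
      | some kw => if kw = "" then ok0 else PySem.Set.inter ok0 (idxSet notes (bKwHit (PySem.Str.lower kw)))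
      | none => ok0
    let ok2 : PySem.Set Int :=
      match status with
      | some st => if st = "" then ok1 else PySem.Set.inter ok1 (idxSet notes (fun note => noteGet? note "status" == some st))
      | none => ok1
    -- [notes[i] for i in sorted(ok)]; every i ∈ ok is a valid index, so notes[i] never raises
    (PySem.List.sorted ok2 (fun x => x)).map (fun i => PySem.List.pyGetD notes i [])

-- ===== PRECONDITION & SPEC =====
def Spec_search_notes (notes : List (List (String × String))) (keyword : Option String) (status : Option String) (out : List (List (String × String))) : Prop := out = search_notes_alt notes keyword status
instance (notes : List (List (String × String))) (keyword : Option String) (status : Option String) (out : List (List (String × String))) : Decidable (Spec_search_notes notes keyword status out) := by unfold Spec_search_notes; infer_instance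

-- ===== CLAIM =====
def Claim_equal_search_notes : Prop := ∀ (notes : List (List (String × String))) (keyword : Option String) (status : Option String), Dom_search_notes notes keyword status → Spec_search_notes notes keyword status (search_notes notes keyword status)

-- ===== LEMMAS AND PROOFS =====

-- the set comprehension over enumerate IS the filtered index range
theorem idxSet_eq_filter_range (notes : List (List (String × String))) (p : List (String × String) → Bool) :
    idxSet notes p = (PySem.List.pyRange 0 (PySem.List.len notes)).filter (fun j => p (PySem.List.pyGetD notes j [])) := by
  unfold idxSet
  rw [PySem.List.enumerate_eq_map_pyRange notes [], List.filter_map, List.map_map]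
  simp only [Function.comp_def]
  rw [List.map_id_fun']
  exact PySem.Set.ofList_eq_self_of_nodup _ ((PySem.List.nodup_pyRange_one 0 _).filter _)

-- intersecting one filtered index range with another filters by the conjunction
theorem inter_filter_range (a b : Int) (q p : Int → Bool) :
    PySem.Set.inter ((PySem.List.pyRange a b).filter q)
        ((PySem.List.pyRange a b).filter p)
      = (PySem.List.pyRange a b).filter (fun j => q j && p j) := by
  show ((PySem.List.pyRange a b).filter q).filter
      (fun x => PySem.Set.contains ((PySem.List.pyRange a b).filter p) x)
    = _
  rw [List.filter_filter]
  refine List.filter_congr (fun j hj => ?_)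
  cases hp : p j with
  | true =>
    have hc : PySem.Set.contains ((PySem.List.pyRange a b).filter p) j = true :=
      (PySem.Set.contains_iff _ _).2 (List.mem_filter.2 ⟨hj, hp⟩)
    rw [hc]; simp
  | false =>
    have hc : PySem.Set.contains ((PySem.List.pyRange a b).filter p) j = false := by
      rw [Bool.eq_false_iff]
      intro h
      have := (List.mem_filter.1 ((PySem.Set.contains_iff _ _).1 h)).2
      rw [hp] at this; exact Bool.false_ne_true this
    rw [hc]; simp

-- gathering a sorted filtered index range rebuilds the list filter
theorem gather_filter_range (notes : List (List (String × String))) (p : List (String × String) → Bool) :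
    (PySem.List.sorted ((PySem.List.pyRange 0 (PySem.List.len notes)).filter
        (fun j => p (PySem.List.pyGetD notes j []))) (fun x => x)).map
      (fun i => PySem.List.pyGetD notes i [])
    = notes.filter p := by
  rw [PySem.List.sorted_eq_self_of_pairwise _ _
    (((PySem.List.pairwise_lt_pyRange_one 0 _).filter _).imp (fun h => le_of_lt h))]
  have hcomp : (fun j => p (PySem.List.pyGetD notes j [])) = p ∘ (fun j => PySem.List.pyGetD notes j []) := rfl
  rw [hcomp, ← List.filter_map, PySem.List.map_pyGetD_pyRange_zero]

-- ok0 = set(range(n)) is the full index range, filtered by the trivial predicate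
theorem ok0_eq (notes : List (List (String × String))) :
    PySem.Set.ofList (PySem.List.pyRange 0 (PySem.List.len notes))
      = (PySem.List.pyRange 0 (PySem.List.len notes)).filter (fun _ => true) := by
  rw [List.filter_true]
  exact PySem.Set.ofList_eq_self_of_nodup _ (PySem.List.nodup_pyRange_one 0 _)

-- ===== VERDICT =====
theorem search_notes_spec : Claim_equal_search_notes := by
  intro notes keyword status _
  unfold Spec_search_notes search_notes search_notes_alt
  by_cases hn : notes = []
  · simp [hn]
  · simp only [if_neg hn]
    cases keyword with
    | none =>
      cases status with
      | none =>
        dsimp only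
        rw [ok0_eq, gather_filter_range notes (fun _ => true), List.filter_true]
      | some st =>
        by_cases hst : st = ""
        · subst hst; simp only [reduceIte]
          rw [ok0_eq, gather_filter_range notes (fun _ => true), List.filter_true]
        · simp only [if_neg hst]
          rw [ok0_eq, idxSet_eq_filter_range, inter_filter_range]
          simp only [Bool.true_and]
          rw [gather_filter_range notes (fun note => noteGet? note "status" == some st)]
    | some kw =>
      by_cases hkw : kw = ""
      · subst hkw; simp only [reduceIte]
        cases status with
        | none =>
          rw [ok0_eq, gather_filter_range notes (fun _ => true), List.filter_true]
        | some st =>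
          by_cases hst : st = ""
          · subst hst; simp only [reduceIte]
            rw [ok0_eq, gather_filter_range notes (fun _ => true), List.filter_true]
          · simp only [if_neg hst]
            rw [ok0_eq, idxSet_eq_filter_range, inter_filter_range]
            simp only [Bool.true_and]
            rw [gather_filter_range notes (fun note => noteGet? note "status" == some st)]
      · simp only [if_neg hkw]
        cases status with
        | none =>
          dsimp only
          rw [ok0_eq, idxSet_eq_filter_range, inter_filter_range]
          simp only [Bool.true_and]
          rw [gather_filter_range notes (bKwHit (PySem.Str.lower kw))]
          exact List.filter_congr (fun n _ => by simp [aKwHit, bKwHit])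
        | some st =>
          by_cases hst : st = ""
          · subst hst; simp only [reduceIte]
            rw [ok0_eq, idxSet_eq_filter_range, inter_filter_range]
            simp only [Bool.true_and]
            rw [gather_filter_range notes (bKwHit (PySem.Str.lower kw))]
            exact List.filter_congr (fun n _ => by simp [aKwHit, bKwHit])
          · simp only [if_neg hst]
            rw [ok0_eq, idxSet_eq_filter_range notes (bKwHit (PySem.Str.lower kw)), inter_filter_range,
                idxSet_eq_filter_range notes (fun note => noteGet? note "status" == some st), inter_filter_range]
            simp only [Bool.true_and]
            rw [gather_filter_range notes
                  (fun note => bKwHit (PySem.Str.lower kw) note && (noteGet? note "status" == some st)),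
                List.filter_filter]
            exact List.filter_congr (fun n _ => by simp [aKwHit, bKwHit, Bool.and_comm])
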